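-- pv_equiv track=rewrite | github.com/alexisgourdol/advent2024 | day09/day09.py | swap_deque
-- ===== SOURCE A (Python) =====
-- from collections import deque
--
-- def swap_deque(s: str) -> list:
--     res = []
--     d = deque(s)
--     while len(d) > 1:
--         left = d.popleft()
--         right = d.pop()
--         if left == "." and right != ".":
--             res.append(right)
--         elif left == "." and right == ".":
--             # put back left dot to compare next to the right non dot value
--             d.appendleft(left)
--         else:
--             res.append(left)
--             d.append(right)
--     if len(d) == 1:
--         res.append(d.pop())
--     return [el for el in res if el != "."]
-- ===== SOURCE B (Python) =====
-- def swap_deque(s: str) -> list: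
--     nd = [c for c in s if c != '.']
--     rev = iter(reversed(nd))
--     return [c if c != '.' else next(rev) for c in s[:len(nd)]]
-- ===== Notes on version B (the rewrite author's own statement) =====
-- stated objective: simpler
-- what changed: A simulates a deque, repeatedly popping from both ends and pushing non-dot right elements back; B precomputes the list of non-dot characters once and does a single forward pass over a prefix of s, filling each gap from a reversed iterator of that list.
import Mathlib
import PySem

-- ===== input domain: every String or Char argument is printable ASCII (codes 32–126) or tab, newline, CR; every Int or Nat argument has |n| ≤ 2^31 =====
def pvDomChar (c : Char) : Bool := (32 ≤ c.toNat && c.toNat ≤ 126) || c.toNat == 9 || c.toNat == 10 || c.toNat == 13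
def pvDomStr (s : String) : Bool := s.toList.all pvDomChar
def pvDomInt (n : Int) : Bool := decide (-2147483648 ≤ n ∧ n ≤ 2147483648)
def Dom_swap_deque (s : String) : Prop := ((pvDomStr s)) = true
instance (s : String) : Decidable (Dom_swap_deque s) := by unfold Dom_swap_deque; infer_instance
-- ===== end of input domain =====

-- B replaces A's bidirectional deque simulation by a precomputed non-dot list consumed from
-- the right during one forward pass over a prefix of s (objective: simpler).

-- ===== PORT A =====
-- the while-loop of A: d is the deque (front = left end), res the accumulator
def pvLoopA (d : List Char) (res : List Char) : List Char :=
  match d with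
  | [] => res                                   -- len(d) == 0: loop ends, nothing to append
  | [c] => res ++ [c]                           -- len(d) == 1: loop ends, res.append(d.pop())
  | l :: x :: rest =>
    let r := (x :: rest).getLast (by simp)      -- right = d.pop()
    let m := (x :: rest).dropLast
    if l = '.' ∧ r ≠ '.' then pvLoopA m (res ++ [r])
    else if l = '.' ∧ r = '.' then pvLoopA (l :: m) res
    else pvLoopA (m ++ [r]) (res ++ [l])
termination_by d.length
decreasing_by
  all_goals simp [List.length_dropLast]

def swap_deque (s : String) : List String :=
  ((pvLoopA s.toList []).filter (fun c => c != '.')).map (fun c => String.ofList [c])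

-- ===== PORT B =====
-- the list comprehension of B: walks the prefix, rev is the reversed-iterator's remainder
def pvAltGo : List Char → List Char → List Char
  | [], _ => []
  | c :: cs, rev =>
    if c != '.' then c :: pvAltGo cs rev
    else
      match rev with
      | x :: xs => x :: pvAltGo cs xs
      | [] => []        -- next() on an exhausted iterator; unreachable on the inputs B builds

def swap_deque_alt (s : String) : List String :=
  let nd := s.toList.filter (fun c => c != '.')
  (pvAltGo (s.toList.take nd.length) nd.reverse).map (fun c => String.ofList [c])

-- ===== PRECONDITION & SPEC =====
def Spec_swap_deque (s : String) (out : List String) : Prop := out = swap_deque_alt s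
instance (s : String) (out : List String) : Decidable (Spec_swap_deque s out) := by unfold Spec_swap_deque; infer_instance

-- ===== CLAIM (what is proved, stated in full; the proofs are below) =====
def Claim_equal_swap_deque : Prop := ∀ (s : String), Dom_swap_deque s → Spec_swap_deque s (swap_deque s)

-- ===== LEMMAS AND PROOFS =====

-- common characterisation: compacted output of a list of chars
def pvH : List Char → List Char
  | [] => []
  | c :: t =>
    if c != '.' then c :: pvH t
    else
      let rd := t.reverse.dropWhile (fun x => x == '.')
      if h : rd = [] then []
      else (rd.head h) :: pvH rd.tail.reverse
termination_by s => s.length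
decreasing_by
  · simp
  · have h1 : (t.reverse.dropWhile (fun x => x == '.')).length ≤ t.length := by
      simpa using List.length_dropWhile_le (fun x => x == '.') t.reverse
    simp_all [List.length_tail]; omega

theorem loopA_filter : ∀ n d res, List.length d = n →
    (pvLoopA d res).filter (fun c => c != '.') =
      res.filter (fun c => c != '.') ++ pvH d := by
  intro n
  induction n using Nat.strong_induction_on with
  | _ n ih =>
    intro d res hlen
    match d with
    | [] => simp [pvLoopA, pvH]
    | [c] =>
      by_cases hc : c = '.'
      · subst hc; simp [pvLoopA, pvH]
      · have hb : (c != '.') = true := by simpa [bne_iff_ne] using hc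
        simp [pvLoopA, pvH, hb]
    | l :: x :: rest =>
      have hne : (x :: rest) ≠ [] := by simp
      have hsplit : (x :: rest).dropLast ++ [(x :: rest).getLast hne] = x :: rest :=
        List.dropLast_append_getLast hne
      have hn : rest.length + 2 = n := by simpa using hlen
      rw [pvLoopA]
      set r := (x :: rest).getLast hne with hrdef
      set m := (x :: rest).dropLast with hmdef
      have hlm : m.length = rest.length := by simp [hmdef]
      have hrev : (x :: rest).reverse = r :: m.reverse := by
        rw [← hsplit]; simp
      by_cases hl : l = '.' <;> by_cases hr : r = '.'
      · -- left dot, right dot: put back left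
        rw [if_neg (by simp [hr]), if_pos ⟨hl, hr⟩]
        rw [ih (rest.length + 1) (by omega) (l :: m) res (by simp [hlm])]
        subst hl
        congr 1
        -- pvH ('.'::x::rest) = pvH ('.'::m)
        have hdw : (x :: rest).reverse.dropWhile (fun x => x == '.') =
            m.reverse.dropWhile (fun x => x == '.') := by
          rw [hrev, hr]; simp [List.dropWhile]
        rw [pvH, pvH]
        simp only [bne_self_eq_false, Bool.false_eq_true, if_false, hdw]
      · -- left dot, right non-dot
        rw [if_pos ⟨hl, hr⟩]
        rw [ih rest.length (by omega) m (res ++ [r]) hlm]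
        subst hl
        have hdw : (x :: rest).reverse.dropWhile (fun x => x == '.') = r :: m.reverse := by
          have hrb0 : (r == '.') = false := by simpa using hr
          rw [hrev]; simp [List.dropWhile, hrb0]
        have hrb : (r != '.') = true := by simpa [bne_iff_ne] using hr
        rw [pvH]
        simp only [bne_self_eq_false, Bool.false_eq_true, if_false, hdw]
        simp [List.filter_append, hrb]
      · -- left non-dot
        rw [if_neg (by simp [hl]), if_neg (by simp [hl])]
        rw [ih (rest.length + 1) (by omega) (m ++ [r]) (res ++ [l]) (by simp [hlm])]
        have hlb : (l != '.') = true := by simpa [bne_iff_ne] using hl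
        rw [pvH]
        simp [List.filter_append, hlb, hsplit]
      · rw [if_neg (by simp [hl]), if_neg (by simp [hl])]
        rw [ih (rest.length + 1) (by omega) (m ++ [r]) (res ++ [l]) (by simp [hlm])]
        have hlb : (l != '.') = true := by simpa [bne_iff_ne] using hl
        rw [pvH]
        simp [List.filter_append, hlb, hsplit]

theorem altGo_ext : ∀ p rev ext, p.count '.' ≤ rev.length →
    pvAltGo p (rev ++ ext) = pvAltGo p rev := by
  intro p
  induction p with
  | nil => intro rev ext h; simp [pvAltGo]
  | cons c cs ih =>
    intro rev ext h
    by_cases hc : c = '.'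
    · subst hc
      have h1 : cs.count '.' + 1 ≤ rev.length := by
        simpa [List.count_cons] using h
      match rev with
      | [] => simp at h1
      | x :: xs =>
        simp only [pvAltGo, bne_self_eq_false, List.cons_append, Bool.false_eq_true,
          ite_false]
        exact congrArg _ (ih xs ext (by simpa using h1))
    · have h1 : cs.count '.' ≤ rev.length := by
        have : (c :: cs).count '.' = cs.count '.' := by simp [hc]
        omega
      have hb : (c != '.') = true := by simpa [bne_iff_ne] using hc
      simp only [pvAltGo, hb, if_true]
      exact congrArg _ (ih rev ext h1)

theorem altB_eq_pvH : ∀ n s, List.length s = n →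
    pvAltGo (s.take (s.filter (fun c => c != '.')).length)
        ((s.filter (fun c => c != '.')).reverse) = pvH s := by
  intro n
  induction n using Nat.strong_induction_on with
  | _ n ih =>
    intro s hlen
    match s with
    | [] => simp [pvAltGo, pvH]
    | c :: t =>
      have hn : t.length + 1 = n := by simpa using hlen
      by_cases hc : c = '.'
      · subst hc
        by_cases hft : t.filter (fun c => c != '.') = []
        · have hall : ∀ x ∈ t.reverse, (x == '.') = true := by
            intro x hx
            have := (List.filter_eq_nil_iff.mp hft) x (List.mem_reverse.mp hx)
            simpa using this
          have hrd : t.reverse.dropWhile (fun x => x == '.') = [] :=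
            List.dropWhile_eq_nil_iff.mpr hall
          simp [pvAltGo, pvH, hft, hrd]
        · have hrdne : t.reverse.dropWhile (fun x => x == '.') ≠ [] := by
            intro h0
            apply hft
            apply List.filter_eq_nil_iff.mpr
            intro a ha
            have := (List.dropWhile_eq_nil_iff.mp h0) a (List.mem_reverse.mpr ha)
            simp at this; simp [this]
          cases hrd : t.reverse.dropWhile (fun x => x == '.') with
          | nil => exact absurd hrd hrdne
          | cons L ru =>
            have hL : (L == '.') = false := by
              have h0 := List.head_dropWhile_not (fun x => x == '.') hrdne
              simp only [hrd, List.head_cons] at h0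
              exact h0
            have hLne : (L != '.') = true := by simp [bne, hL]
            have ht : t = ru.reverse ++ ([L] ++ (t.reverse.takeWhile (fun x => x == '.')).reverse) := by
              conv_lhs => rw [← List.reverse_reverse t,
                ← List.takeWhile_append_dropWhile (p := fun x => x == '.') (l := t.reverse)]
              rw [hrd]
              simp
            have hds : (t.reverse.takeWhile (fun x => x == '.')).reverse.filter
                (fun c => c != '.') = [] := by
              apply List.filter_eq_nil_iff.mpr
              intro a ha
              have := List.mem_takeWhile_imp (List.mem_reverse.mp ha)
              simp at this; simp [this]
            have hfil : t.filter (fun c => c != '.') =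
                ru.reverse.filter (fun c => c != '.') ++ [L] := by
              conv_lhs => rw [ht]
              simp [List.filter_append, hds, hLne]
            have hk : (ru.reverse.filter (fun c => c != '.')).length ≤ ru.reverse.length :=
              List.length_filter_le _ _
            have htake : t.take (ru.reverse.filter (fun c => c != '.')).length =
                ru.reverse.take (ru.reverse.filter (fun c => c != '.')).length := by
              conv_lhs => rw [ht]
              exact List.take_append_of_le_length hk
            have hru : ru.length < n := by
              have h2 : (t.reverse.dropWhile (fun x => x == '.')).length ≤ t.length := by
                simpa using List.length_dropWhile_le (fun x => x == '.') t.reverse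
              rw [hrd] at h2; simp at h2; omega
            -- LHS
            rw [List.filter_cons]
            simp only [bne_self_eq_false, Bool.false_eq_true, if_false]
            rw [hfil]
            simp only [List.length_append, List.length_cons, List.length_nil,
              List.reverse_append, List.reverse_cons, List.reverse_nil, List.nil_append]
            rw [List.take_cons (by omega)]
            simp only [pvAltGo, bne_self_eq_false, Bool.false_eq_true, if_false,
              List.singleton_append]
            have hidx : (List.filter (fun c => c != '.') ru.reverse).length + (0 + 1) - 1 =
                (List.filter (fun c => c != '.') ru.reverse).length := by omega
            rw [hidx, htake]
            rw [ih ru.reverse.length (by simpa using hru) ru.reverse rfl]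
            rw [pvH]
            simp only [bne_self_eq_false, Bool.false_eq_true, if_false, hrd]
            simp
      · have hb : (c != '.') = true := by simpa [bne_iff_ne] using hc
        rw [List.filter_cons]
        simp only [hb, if_true]
        simp only [List.length_cons, List.reverse_cons, List.take_succ_cons]
        simp only [pvAltGo, hb, if_true]
        rw [altGo_ext _ _ _ (by
          calc (t.take (t.filter (fun c => c != '.')).length).count '.'
              ≤ (t.take (t.filter (fun c => c != '.')).length).length := List.count_le_length
            _ ≤ (t.filter (fun c => c != '.')).length := by simp
            _ = (t.filter (fun c => c != '.')).reverse.length := by simp)]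
        rw [ih t.length (by omega) t rfl, pvH]
        simp [hb]

-- ===== VERDICT (by name: the statement is the Claim_ definition above) =====
theorem swap_deque_spec : Claim_equal_swap_deque := by
  intro s _
  unfold Spec_swap_deque swap_deque swap_deque_alt
  dsimp only []
  rw [loopA_filter _ s.toList [] rfl, altB_eq_pvH _ s.toList rfl]
  simp
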